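-- pv_equiv track=rewrite | github.com/Eboreg/klaatu-django | groplay/utils.py | circulate
-- ===== SOURCE A (Python) =====
-- from typing import Any, Callable, Dict, Iterable, Iterator, List, Optional, Sequence, SupportsFloat, TypeVar, Union
--
-- def circulate(lst: Union[list, tuple], rounds: int) -> list:
--     """
--     Shifts `lst` left `rounds` times. Good for e.g. circulating colours in
--     a graph.
--     """
--     if isinstance(lst, tuple):
--         lst = list(lst)
--     if lst and rounds:
--         for i in range(rounds):
--             val = lst.pop(0)
--             lst.append(val)
--     return lst
-- ===== SOURCE B (Python) =====
-- def circulate(lst, rounds):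
--     """
--     Shifts `lst` left `rounds` times. Good for e.g. circulating colours in
--     a graph.
--     """
--     lst = list(lst)
--     if lst and rounds > 0:
--         r = rounds % len(lst)
--         return lst[r:] + lst[:r]
--     return lst
-- ===== Notes on version B (the rewrite author's own statement) =====
-- stated objective: faster
-- what changed: Replaces the rounds-times pop/append loop by a single modular slice lst[r:]+lst[:r] with r = rounds % len(lst).
import Mathlib
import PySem

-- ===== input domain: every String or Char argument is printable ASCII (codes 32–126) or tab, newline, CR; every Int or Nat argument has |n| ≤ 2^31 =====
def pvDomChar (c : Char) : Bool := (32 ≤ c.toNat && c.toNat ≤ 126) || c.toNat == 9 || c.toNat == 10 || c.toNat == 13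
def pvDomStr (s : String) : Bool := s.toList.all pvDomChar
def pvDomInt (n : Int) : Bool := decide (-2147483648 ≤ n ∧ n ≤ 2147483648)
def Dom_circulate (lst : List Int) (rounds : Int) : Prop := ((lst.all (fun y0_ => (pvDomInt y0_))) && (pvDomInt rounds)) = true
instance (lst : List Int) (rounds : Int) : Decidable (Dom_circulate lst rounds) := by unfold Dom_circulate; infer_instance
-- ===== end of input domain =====

-- B replaces A's rounds-times pop/append loop by one modular slice (faster); A mutates a
-- list argument in place while B builds a new list — the equivalence proved is about the
-- RETURN value only.

-- ===== PORT A =====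
-- `for i in range(rounds): val = lst.pop(0); lst.append(val)` — one fold step per loop
-- iteration; range(rounds) has rounds.toNat elements (empty for rounds ≤ 0).
def circulate (lst : List Int) (rounds : Int) : List Int :=
  if lst ≠ [] ∧ rounds ≠ 0 then
    (List.range rounds.toNat).foldl
      (fun l _ => match l with
        | [] => []            -- unreachable: the list stays nonempty (pop then append)
        | x :: xs => xs ++ [x]) lst
  else lst

-- ===== PORT B =====
def circulate_alt (lst : List Int) (rounds : Int) : List Int :=
  if lst ≠ [] ∧ rounds > 0 then
    let r := PySem.Int.mod rounds (lst.length : Int)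
    PySem.List.slice lst (some r) none ++ PySem.List.slice lst none (some r)
  else lst

-- ===== PRECONDITION & SPEC =====
def Spec_circulate (lst : List Int) (rounds : Int) (out : List Int) : Prop := out = circulate_alt lst rounds
instance (lst : List Int) (rounds : Int) (out : List Int) : Decidable (Spec_circulate lst rounds out) := by unfold Spec_circulate; infer_instance

-- ===== CLAIM (what is proved, stated in full; the proofs are below) =====
def Claim_equal_circulate : Prop := ∀ (lst : List Int) (rounds : Int), Dom_circulate lst rounds → Spec_circulate lst rounds (circulate lst rounds)

-- ===== LEMMAS AND PROOFS =====

-- A's loop over range n rotates by n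
theorem foldl_range_rotate (lst : List Int) (h : lst ≠ []) (n : ℕ) :
    (List.range n).foldl
      (fun l _ => match l with | [] => ([] : List Int) | x :: xs => xs ++ [x]) lst
      = lst.rotate n := by
  induction n with
  | zero => simp
  | succ n ih =>
    rw [List.range_succ, List.foldl_append, ih]
    simp only [List.foldl_cons, List.foldl_nil]
    obtain ⟨x, xs, hx⟩ : ∃ x xs, lst.rotate n = x :: xs := by
      cases hrot : lst.rotate n with
      | nil => exact absurd (by simpa using hrot) h
      | cons x xs => exact ⟨x, xs, rfl⟩
    calc (match lst.rotate n with | [] => ([] : List Int) | x :: xs => xs ++ [x])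
        = (lst.rotate n).rotate 1 := by rw [hx]; simp [List.rotate_cons_succ]
      _ = lst.rotate (n + 1) := List.rotate_rotate lst n 1

theorem circulate_spec_aux (lst : List Int) (rounds : Int) :
    circulate lst rounds = circulate_alt lst rounds := by
  unfold circulate circulate_alt
  by_cases hl : lst = []
  · simp [hl]
  · by_cases hr : 0 < rounds
    · have hr0 : rounds ≠ 0 := by omega
      rw [if_pos ⟨hl, hr0⟩, if_pos ⟨hl, hr⟩, foldl_range_rotate lst hl]
      have hlen : 0 < lst.length := List.length_pos_iff.mpr hl
      have hmod : PySem.Int.mod rounds (lst.length : Int) = rounds % (lst.length : Int) :=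
        PySem.Int.mod_eq_emod_of_pos (by exact_mod_cast hlen)
      have hcast : rounds % (lst.length : Int) = ((rounds.toNat % lst.length : ℕ) : Int) := by
        have : rounds = (rounds.toNat : Int) := by omega
        rw [this]; exact_mod_cast rfl
      simp only [hmod, hcast, PySem.List.slice_from_natCast, PySem.List.slice_to_natCast]
      exact List.rotate_eq_drop_append_take_mod
    · have : ¬ (lst ≠ [] ∧ 0 < rounds) := by tauto
      rw [if_neg this]
      by_cases hz : rounds = 0
      · simp [hz]
      · rw [if_pos ⟨hl, hz⟩]
        have : rounds.toNat = 0 := by omega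
        simp [this]

-- ===== VERDICT (by name: the statement is the Claim_ definition above) =====
theorem circulate_spec : Claim_equal_circulate := by
  intro lst rounds _
  exact circulate_spec_aux lst rounds
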